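-- pv_equiv track=rewrite | github.com/mahakgoindani/Networks-Project | create_data.py | get_dicts
-- ===== SOURCE A (Python) =====
-- def get_dicts(dataset):
--   dict_1, dict_2, dict_3= {}, {}, {}
--   count1, count2, count3 = 0, 0, 0
--   for sample in dataset:
--     value = sample[1]
--     if(value not in dict_1):
--         count1 = count1 + 1
--         dict_1[value] = count1
--     value = sample[2]
--     if(value not in dict_2):
--         count2 = count2 + 1;
--         dict_2[value] = count2
--     value = sample[3]
--     if(value not in dict_3):
--         count3 = count3 + 1
--         dict_3[value] = count3
--   return dict_1, dict_2, dict_3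
-- ===== SOURCE B (Python) =====
-- def get_dicts(dataset):
--   rows = list(dataset)
--   def col_ids(k):
--     col = [r[k] for r in rows]
--     order = sorted(set(col), key=col.index)
--     return {v: i for i, v in enumerate(order, 1)}
--   return col_ids(1), col_ids(2), col_ids(3)
-- ===== Notes on version B (the rewrite author's own statement) =====
-- stated objective: alternative
-- what changed: Replaces A's inline membership-check-plus-counter assignment with a per-column sort-and-rank pipeline: take the set of distinct column values, sort them by index of first occurrence, and enumerate ranks from 1.
import Mathlib
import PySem

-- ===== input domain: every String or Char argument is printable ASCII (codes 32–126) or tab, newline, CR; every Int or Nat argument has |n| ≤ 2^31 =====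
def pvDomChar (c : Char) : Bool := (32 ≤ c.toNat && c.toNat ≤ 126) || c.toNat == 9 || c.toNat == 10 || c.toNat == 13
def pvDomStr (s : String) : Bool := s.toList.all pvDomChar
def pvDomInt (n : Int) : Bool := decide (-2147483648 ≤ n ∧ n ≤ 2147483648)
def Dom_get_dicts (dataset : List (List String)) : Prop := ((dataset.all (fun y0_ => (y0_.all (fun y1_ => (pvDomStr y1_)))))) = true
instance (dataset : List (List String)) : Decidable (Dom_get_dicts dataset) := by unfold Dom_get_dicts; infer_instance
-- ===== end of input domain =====

-- B replaces A's inline membership-check + counter loop by a sort: per column it takes the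
-- set of distinct values, sorts them by index of first occurrence, and ranks them from 1
-- (alternative decomposition; not claimed faster).

-- ===== PORT A =====
-- one repeated block of A's loop body: "if value not in d: count += 1; d[value] = count"
def pvStepA (st : PySem.Dict String Int × Int) (value : String) : PySem.Dict String Int × Int :=
  if st.1.contains value then st else (st.1.insert value (st.2 + 1), st.2 + 1)

-- sample[1] etc. ported as pyGetD with default "": Pre_get_dicts guarantees the index is in range
def get_dicts (dataset : List (List String)) : (List (String × Int)) × (List (String × Int)) × (List (String × Int)) :=
  let st := dataset.foldl
    (fun (st : (PySem.Dict String Int × Int) × (PySem.Dict String Int × Int) × (PySem.Dict String Int × Int)) sample =>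
      (pvStepA st.1 (PySem.List.pyGetD sample 1 ""),
       pvStepA st.2.1 (PySem.List.pyGetD sample 2 ""),
       pvStepA st.2.2 (PySem.List.pyGetD sample 3 "")))
    ((PySem.Dict.empty, 0), (PySem.Dict.empty, 0), (PySem.Dict.empty, 0))
  (st.1.1.items, st.2.1.1.items, st.2.2.1.items)

-- ===== PORT B =====
-- col = [r[k] for r in rows]; order = sorted(set(col), key=col.index); {v: i for i, v in enumerate(order, 1)}
-- (the Python set's hash order is irrelevant: col.index is injective on distinct values, so the
--  sorted result is order-independent; the port sorts Set.ofList col, a set with the same elements)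
def pvColIdsB (rows : List (List String)) (k : Int) : List (String × Int) :=
  let col := rows.map (fun r => PySem.List.pyGetD r k "")
  let order := PySem.List.sorted (PySem.Set.ofList col)
    (fun v => (PySem.List.index? col v).getD 0) false
  (PySem.List.enumerate order 1).map (fun p => (p.2, p.1))

def get_dicts_alt (dataset : List (List String)) : (List (String × Int)) × (List (String × Int)) × (List (String × Int)) :=
  let rows := dataset
  (pvColIdsB rows 1, pvColIdsB rows 2, pvColIdsB rows 3)

-- ===== PRECONDITION & SPEC =====
-- A indexes sample[1], sample[2], sample[3]: rows shorter than 4 make A raise IndexError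
def Pre_get_dicts (dataset : List (List String)) : Prop :=
  ∀ sample ∈ dataset, 4 ≤ sample.length
instance (dataset : List (List String)) : Decidable (Pre_get_dicts dataset) := by
  unfold Pre_get_dicts; infer_instance

def pvWitness_get_dicts : List (List String) :=
  [["id0", "a", "x", "p"], ["id1", "b", "x", "q"], ["id2", "a", "y", "p"]]

def Spec_get_dicts (dataset : List (List String)) (out : (List (String × Int)) × (List (String × Int)) × (List (String × Int))) : Prop := out = get_dicts_alt dataset
instance (dataset : List (List String)) (out : (List (String × Int)) × (List (String × Int)) × (List (String × Int))) : Decidable (Spec_get_dicts dataset out) := by unfold Spec_get_dicts; infer_instance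

-- ===== CLAIM (what is proved, stated in full; the proofs are below) =====
def Claim_equal_get_dicts : Prop := ∀ (dataset : List (List String)), Dom_get_dicts dataset → Pre_get_dicts dataset → Spec_get_dicts dataset (get_dicts dataset)

-- ===== LEMMAS AND PROOFS =====

-- the common normal form both sides are reduced to: distinct column values in
-- first-occurrence order, paired with ranks 1, 2, …
def pvColIds (col : List String) : List (String × Int) :=
  (PySem.List.enumerate (PySem.List.dedup col) 1).map (fun p => (p.2, p.1))

-- ---- B side: sorting set(col) by first-occurrence index reproduces dedup order ----

theorem idx_getD (xs : List String) (v : String) (h : v ∈ xs) :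
    (PySem.List.index? xs v).getD 0 = xs.idxOf v := by
  induction xs with
  | nil => simp at h
  | cons x t ih =>
    by_cases hx : x = v
    · subst hx
      have := PySem.List.index?_cons_self x t
      simp only [PySem.List.index?_eq_idxOf?] at this
      simp [this]
    · rw [show PySem.List.index? (x :: t) v = (PySem.List.index? t v).map (· + 1) from
        PySem.List.index?_cons_of_ne t hx]
      have hv : v ∈ t := by simpa [Ne.symm hx] using h
      have hs := (PySem.List.index?_isSome_iff t v).mpr hv
      rcases hk : PySem.List.index? t v with _ | k
      · rw [hk] at hs; simp at hs
      · rw [List.idxOf_cons_ne t hx, ← ih hv, hk]; rfl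

theorem foldl_add_cons (xs : List String) : ∀ (s : List String) (x : String),
    xs.foldl PySem.Set.add (x :: s) = x :: (xs.filter (fun v => !(v == x))).foldl PySem.Set.add s := by
  induction xs with
  | nil => intro s x; simp
  | cons y t ih =>
    intro s x
    by_cases hyx : y = x
    · subst hyx
      simp [ih]
    · by_cases hys : y ∈ s
      · have h1 : PySem.Set.add (x :: s) y = x :: s := PySem.Set.add_of_mem (by simp [hys])
        have h2 : PySem.Set.add s y = s := PySem.Set.add_of_mem hys
        simp [hyx, h1, h2, ih]
      · have h1 : PySem.Set.add (x :: s) y = x :: (s ++ [y]) := by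
          rw [PySem.Set.add_of_not_mem (by simp [hys]; exact hyx)]; rfl
        have h2 : PySem.Set.add s y = s ++ [y] := PySem.Set.add_of_not_mem hys
        simp [hyx, h1, h2, ih]

theorem dedup_cons (x : String) (xs : List String) :
    PySem.List.dedup (x :: xs) = x :: PySem.List.dedup (xs.filter (fun v => !(v == x))) := by
  have h0 : PySem.Set.add ([] : List String) x = [x] := PySem.Set.add_of_not_mem (by simp)
  simp only [PySem.List.dedup_eq_ofList, PySem.Set.ofList_eq_foldl, List.foldl_cons, h0]
  exact foldl_add_cons xs [] x

theorem idxOf_filter_mono (x a b : String) : ∀ (xs : List String), a ≠ x → b ≠ x →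
    (xs.filter (fun v => !(v == x))).idxOf a < (xs.filter (fun v => !(v == x))).idxOf b →
    xs.idxOf a < xs.idxOf b := by
  intro xs
  induction xs with
  | nil => simp
  | cons y t ih =>
    intro ha hb hlt
    by_cases hyx : y = x
    · subst hyx
      rw [List.filter_cons_of_neg (by simp)] at hlt
      rw [List.idxOf_cons_ne t (fun h => ha h.symm), List.idxOf_cons_ne t (fun h => hb h.symm)]
      exact Nat.succ_lt_succ (ih ha hb hlt)
    · rw [List.filter_cons_of_pos (by simp; exact hyx)] at hlt
      by_cases hya : y = a
      · subst hya
        rw [List.idxOf_cons_self]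
        have hba : b ≠ y := by
          intro h; subst h; simp at hlt
        rw [List.idxOf_cons_ne t (fun h => hba h.symm)]
        omega
      · by_cases hyb : y = b
        · subst hyb
          rw [List.idxOf_cons_ne _ hya, List.idxOf_cons_self] at hlt
          omega
        · rw [List.idxOf_cons_ne t hya, List.idxOf_cons_ne t hyb]
          rw [List.idxOf_cons_ne _ hya, List.idxOf_cons_ne _ hyb] at hlt
          have := ih ha hb (by omega)
          omega

-- dedup lists the distinct values in strictly increasing order of first occurrence
theorem dedup_pairwise_idxOf : ∀ (xs : List String),
    (PySem.List.dedup xs).Pairwise (fun a b => xs.idxOf a < xs.idxOf b)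
  | [] => by simp [PySem.List.dedup]
  | x :: t => by
    rw [dedup_cons]
    constructor
    · intro b hb
      have hbt : b ∈ t ∧ ¬(b = x) := by
        simpa using (PySem.List.mem_dedup _ _).mp hb
      rw [List.idxOf_cons_self, List.idxOf_cons_ne t (fun h => hbt.2 h.symm)]
      omega
    · have ihp := dedup_pairwise_idxOf (t.filter (fun v => !(v == x)))
      refine List.Pairwise.imp_of_mem ?_ ihp
      intro a b hma hmb hlt
      have hat : a ∈ t ∧ ¬(a = x) := by simpa using (PySem.List.mem_dedup _ _).mp hma
      have hbt : b ∈ t ∧ ¬(b = x) := by simpa using (PySem.List.mem_dedup _ _).mp hmb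
      rw [List.idxOf_cons_ne t (fun h => hat.2 h.symm), List.idxOf_cons_ne t (fun h => hbt.2 h.symm)]
      exact Nat.succ_lt_succ (idxOf_filter_mono x a b t hat.2 hbt.2 hlt)
termination_by xs => xs.length
decreasing_by simp [List.length_filter_le]

theorem sorted_set_by_index (col : List String) :
    PySem.List.sorted (PySem.Set.ofList col)
      (fun v => (PySem.List.index? col v).getD 0) false = PySem.List.dedup col := by
  apply PySem.List.sorted_eq_of_perm_of_pairwise_lt
  · rw [PySem.List.dedup_eq_ofList]
  · refine List.Pairwise.imp_of_mem ?_ (dedup_pairwise_idxOf col)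
    intro a b hma hmb hlt
    rw [idx_getD col a ((PySem.List.mem_dedup _ _).mp hma),
        idx_getD col b ((PySem.List.mem_dedup _ _).mp hmb)]
    exact hlt

theorem pvColIdsB_eq (rows : List (List String)) (k : Int) :
    pvColIdsB rows k = pvColIds (rows.map (fun r => PySem.List.pyGetD r k "")) := by
  simp only [pvColIdsB, pvColIds, sorted_set_by_index]

-- ---- A side: the membership-check + counter loop builds the same normal form ----

-- the dict A has built after seeing exactly the distinct values s (in order): {v : i+1}
def pvMkD (s : List String) : PySem.Dict String Int :=
  PySem.Dict.mk ((PySem.List.enumerate s 1).map (fun p => (p.2, p.1)))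

theorem pvMkD_keys (s : List String) : (pvMkD s).keys = s := by
  simp [pvMkD, PySem.Dict.keys, Function.comp_def,
    PySem.List.map_snd_enumerate]

theorem pvMkD_contains (s : List String) (v : String) :
    (pvMkD s).contains v = decide (v ∈ s) := by
  rw [PySem.Dict.contains_eq_decide_mem_keys, pvMkD_keys]

theorem pvMkD_insert (s : List String) (v : String) (h : v ∉ s) :
    (pvMkD s).insert v ((s.length : Int) + 1) = pvMkD (s ++ [v]) := by
  apply PySem.Dict.ext
  rw [PySem.Dict.items_insert_of_not_contains _ _ (by simp [pvMkD_contains, h])]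
  simp [pvMkD, PySem.List.enumerate_append, PySem.List.enumerate_cons,
    PySem.List.enumerate_nil]
  ring_nf

theorem pvFoldA_inv (col : List String) (s : List String) :
    col.foldl pvStepA (pvMkD s, (s.length : Int))
      = (pvMkD (PySem.Set.update s col), (((PySem.Set.update s col).length : Int))) := by
  induction col generalizing s with
  | nil => simp [PySem.Set.update]
  | cons v rest ih =>
    by_cases hv : v ∈ s
    · have hadd : PySem.Set.add s v = s := by simp [PySem.Set.add, PySem.Set.contains, hv]
      have : pvStepA (pvMkD s, (s.length : Int)) v = (pvMkD s, (s.length : Int)) := by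
        simp [pvStepA, pvMkD_contains, hv]
      simp only [List.foldl_cons, this, PySem.Set.update, List.foldl_cons, hadd] at *
      exact ih s
    · have hadd : PySem.Set.add s v = s ++ [v] := by
        simp [PySem.Set.add, PySem.Set.contains, hv]
      have : pvStepA (pvMkD s, (s.length : Int)) v
          = (pvMkD (s ++ [v]), ((s ++ [v]).length : Int)) := by
        simp [pvStepA, pvMkD_contains, hv, pvMkD_insert s v hv]
      simp only [List.foldl_cons, this, PySem.Set.update, List.foldl_cons, hadd] at *
      exact ih (s ++ [v])

theorem pvFoldA_col (col : List String) :
    (col.foldl pvStepA (PySem.Dict.empty, 0)).1.items = pvColIds col := by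
  have h0 : (PySem.Dict.empty : PySem.Dict String Int) = pvMkD [] := by
    rfl
  have := pvFoldA_inv col []
  simp only [List.length_nil, Int.natCast_zero] at this
  rw [h0, this]
  have : PySem.Set.update ([] : List String) col = PySem.List.dedup col := by
    simp [PySem.Set.update, PySem.List.dedup_eq_ofList, PySem.Set.ofList_eq_foldl]
  rw [this]
  rfl

-- ===== VERDICT (by name: the statement is the Claim_ definition above) =====
theorem get_dicts_spec : Claim_equal_get_dicts := by
  intro dataset _ _
  unfold Spec_get_dicts get_dicts get_dicts_alt
  rw [PySem.List.foldl_prod_mk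
        (f := fun st sample => pvStepA st (PySem.List.pyGetD sample 1 ""))
        (g := fun (st : (PySem.Dict String Int × Int) × (PySem.Dict String Int × Int)) sample =>
          (pvStepA st.1 (PySem.List.pyGetD sample 2 ""),
           pvStepA st.2 (PySem.List.pyGetD sample 3 ""))),
      PySem.List.foldl_prod_mk
        (f := fun st sample => pvStepA st (PySem.List.pyGetD sample 2 ""))
        (g := fun st sample => pvStepA st (PySem.List.pyGetD sample 3 ""))]
  rw [← List.foldl_map (f := fun sample => PySem.List.pyGetD sample 1 "") (g := pvStepA),
      ← List.foldl_map (f := fun sample => PySem.List.pyGetD sample 2 "") (g := pvStepA),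
      ← List.foldl_map (f := fun sample => PySem.List.pyGetD sample 3 "") (g := pvStepA)]
  simp only [pvFoldA_col, pvColIdsB_eq]
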